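-- pv_equiv track=rewrite | github.com/alexeymishkin/Learning | PyBursa/03/Docs/3.py | a_a_a
-- ===== SOURCE A (Python) =====
-- def a_a_a(input_text):
--     glasn = 'aeuioy'
--     res = 0
--     temp = input_text.split(' ')
--     for i, word in enumerate(temp):
--         temp[i] = word.strip('.,;:').lower()
--         for j, l in enumerate(temp[i][1:-1], start=1):
--             if l == 'a' and (temp[i][j - 1] not in glasn and temp[i][j + 1] not in glasn):
--                 res += 1
--     return res
-- ===== SOURCE B (Python) =====
-- import re
--
-- _PAT = re.compile(r'(?<=[^aeuioy])a(?=[^aeuioy])')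
--
-- def a_a_a(input_text):
--     return sum(len(_PAT.findall(word.strip('.,;:').lower()))
--                for word in input_text.split(' '))
-- ===== Notes on version B (the rewrite author's own statement) =====
-- stated objective: idiomatic
-- what changed: Replaces the explicit index loop with temp[i][j-1]/temp[i][j+1] lookups and list mutation by a precompiled regex with zero-width lookbehind/lookahead ((?<=[^aeuioy])a(?=[^aeuioy])) matched over each cleaned word, summing the match counts.
import Mathlib
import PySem

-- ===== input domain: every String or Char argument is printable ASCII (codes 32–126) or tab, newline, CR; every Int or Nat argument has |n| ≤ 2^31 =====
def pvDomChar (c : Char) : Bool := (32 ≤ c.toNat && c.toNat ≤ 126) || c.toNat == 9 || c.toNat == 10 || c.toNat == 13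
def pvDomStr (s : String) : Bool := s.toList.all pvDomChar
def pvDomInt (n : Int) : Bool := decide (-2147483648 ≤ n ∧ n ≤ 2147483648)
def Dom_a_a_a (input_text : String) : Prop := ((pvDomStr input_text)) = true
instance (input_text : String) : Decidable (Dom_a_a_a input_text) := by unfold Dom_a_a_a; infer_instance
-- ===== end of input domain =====

-- B replaces A's index-based inner loop (with list mutation and temp[i][j±1] lookups) by a
-- regex with zero-width lookbehind/lookahead matched per cleaned word (objective: idiomatic).

-- ===== PORT A =====
-- 'c in glasn' for a single char is char membership; temp[i] is assigned and then only read in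
-- the same iteration, so the list mutation is ported as the local w.
def a_a_a (input_text : String) : Int :=
  let glasn := "aeuioy".toList
  let temp := PySem.Chars.splitOn input_text.toList " ".toList
  temp.foldl (fun res word =>
    let w := PySem.Chars.lower (PySem.Chars.stripChars word ".,;:".toList)
    (PySem.List.enumerate (PySem.List.slice w (some 1) (some (-1))) 1).foldl
      (fun res p =>
        if p.2 == 'a' && !(glasn.contains (PySem.List.pyGetD w (p.1 - 1) ' '))
            && !(glasn.contains (PySem.List.pyGetD w (p.1 + 1) ' '))
        then res + 1 else res) res) 0

-- ===== PORT B =====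
-- hand-written port of re.findall(r'(?<=[^aeuioy])a(?=[^aeuioy])', w) |> len: PySem has no regex,
-- so the matcher for this fixed pattern is ported exactly as the regex engine behaves — a left-to-right
-- state machine carrying the previous character (the lookbehind context); at each position the zero-width
-- lookbehind needs an existing previous non-vowel char, the literal needs 'a', and the zero-width
-- lookahead needs an existing next non-vowel char (head of the remaining input, not consumed).
def pvReCount (prev : Option Char) (u : List Char) : Nat :=
  match u with
  | c :: rest =>
      (if (c == 'a')
          && (match prev with | some p => !("aeuioy".toList.contains p) | none => false)
          && (match rest.head? with | some n => !("aeuioy".toList.contains n) | none => false)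
       then 1 else 0) + pvReCount (some c) rest
  | [] => 0

def a_a_a_alt (input_text : String) : Int :=
  (((PySem.Chars.splitOn input_text.toList " ".toList).map
    (fun word => pvReCount none (PySem.Chars.lower (PySem.Chars.stripChars word ".,;:".toList)))).sum : Nat)

-- ===== PRECONDITION & SPEC =====
def Spec_a_a_a (input_text : String) (out : Int) : Prop := out = a_a_a_alt input_text
instance (input_text : String) (out : Int) : Decidable (Spec_a_a_a input_text out) := by unfold Spec_a_a_a; infer_instance

-- ===== CLAIM (what is proved, stated in full; the proofs are below) =====
def Claim_equal_a_a_a : Prop := ∀ (input_text : String), Dom_a_a_a input_text → Spec_a_a_a input_text (a_a_a input_text)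

-- ===== LEMMAS AND PROOFS =====

-- the per-triple count, by direct recursion on the word: the common characterisation of both programs
def pvTc (u : List Char) : Nat :=
  match u with
  | a :: b :: c :: t =>
      (if b == 'a' && !("aeuioy".toList.contains a) && !("aeuioy".toList.contains c) then 1 else 0)
        + pvTc (b :: c :: t)
  | _ => 0

-- A's inner-loop test as a predicate on an enumerate pair
def pvPA (w : List Char) (p : Int × Char) : Bool :=
  p.2 == 'a' && !("aeuioy".toList.contains (PySem.List.pyGetD w (p.1 - 1) ' '))
      && !("aeuioy".toList.contains (PySem.List.pyGetD w (p.1 + 1) ' '))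

theorem pvSlice1m1 (xs : List Char) :
    PySem.List.slice xs (some 1) (some (-1)) = (xs.drop 1).dropLast := by
  cases xs with
  | nil => rfl
  | cons x t =>
    simp [PySem.List.slice, PySem.List.clampIdx, List.dropLast_eq_take]
    split_ifs <;> omega

theorem pvEnumTc (w : List Char) :
    ∀ (u : List Char) (s : Nat), u = w.drop s →
      ((PySem.List.enumerate ((u.drop 1).dropLast) ((s : Int) + 1)).countP (pvPA w)) = pvTc u
  | [], s, h => by simp [pvTc, PySem.List.enumerate_nil]
  | [a], s, h => by simp [pvTc, PySem.List.enumerate_nil]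
  | [a, b], s, h => by simp [pvTc, PySem.List.enumerate_nil]
  | a :: b :: c :: t, s, h => by
      have h1 : (b :: c :: t : List Char) = w.drop (s + 1) := by
        have := congrArg (List.drop 1) h
        simpa [List.drop_drop] using this
      have ih := pvEnumTc w (b :: c :: t) (s + 1) h1
      simp only [List.drop] at ih
      have ha : w[s]? = some a := by
        have := congrArg (fun l => l[0]?) h
        simpa [List.getElem?_drop] using this.symm
      have hc : w[s + 2]? = some c := by
        have := congrArg (fun l => l[2]?) h
        simpa [List.getElem?_drop] using this.symm
      have e1 : ((s : Int) + 1) - 1 = ((s : Nat) : Int) := by ring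
      simp only [List.drop, List.dropLast_cons₂, PySem.List.enumerate_cons, List.countP_cons]
      rw [show (s : Int) + 1 + 1 = ((s + 1 : Nat) : Int) + 1 by push_cast; ring] at *
      rw [ih]
      have hga : PySem.List.pyGetD w ((s : Nat) : Int) ' ' = a := by
        rw [PySem.List.pyGetD_natCast]; simp [List.getD_eq_getElem?_getD, ha]
      have hgc : PySem.List.pyGetD w (((s + 2 : Nat)) : Int) ' ' = c := by
        rw [PySem.List.pyGetD_natCast]; simp [List.getD_eq_getElem?_getD, hc]
      have hpa : pvPA w ((s : Int) + 1, b)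
          = (b == 'a' && !("aeuioy".toList.contains a) && !("aeuioy".toList.contains c)) := by
        have e2 : ((s : Int) + 1 + 1) = ((s + 2 : Nat) : Int) := by push_cast; ring
        simp only [pvPA, e1, e2, hga, hgc]
      rw [hpa]
      simp only [pvTc]
      omega

-- the regex state machine, started after consuming one character, computes the triple count
theorem pvReSome : ∀ (u : List Char) (a : Char), pvReCount (some a) u = pvTc (a :: u)
  | [], a => by simp [pvReCount, pvTc]
  | [b], a => by simp [pvReCount, pvTc]
  | b :: c :: t, a => by
      have ih := pvReSome (c :: t) b
      have step : pvReCount (some a) (b :: c :: t)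
          = (if (b == 'a') && !("aeuioy".toList.contains a) && !("aeuioy".toList.contains c)
             then 1 else 0) + pvReCount (some b) (c :: t) := rfl
      rw [step, ih]
      simp only [pvTc]

theorem pvReNone (u : List Char) : pvReCount none u = pvTc u := by
  cases u with
  | nil => rfl
  | cons a rest =>
    simp only [pvReCount, pvReSome rest a]
    cases rest <;> simp [pvTc]

-- A's per-word fold adds exactly the triple count
theorem pvStep (w : List Char) (res : Int) :
    (PySem.List.enumerate (PySem.List.slice w (some 1) (some (-1))) 1).foldl
      (fun res p =>
        if p.2 == 'a' && !("aeuioy".toList.contains (PySem.List.pyGetD w (p.1 - 1) ' '))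
            && !("aeuioy".toList.contains (PySem.List.pyGetD w (p.1 + 1) ' '))
        then res + 1 else res) res
    = res + (pvTc w : Int) := by
  rw [pvSlice1m1]
  rw [show ∀ l : List (Int × Char), l.foldl
      (fun res p =>
        if p.2 == 'a' && !("aeuioy".toList.contains (PySem.List.pyGetD w (p.1 - 1) ' '))
            && !("aeuioy".toList.contains (PySem.List.pyGetD w (p.1 + 1) ' '))
        then res + 1 else res) res = res + (l.countP (pvPA w) : Int)
    from fun l => PySem.List.foldl_if_add_one (pvPA w) l res]
  have := pvEnumTc w w 0 rfl
  simp only [Nat.cast_zero, zero_add] at this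
  rw [this]

-- ===== VERDICT (by name: the statement is the Claim_ definition above) =====
theorem a_a_a_spec : Claim_equal_a_a_a := by
  intro input_text _
  unfold Spec_a_a_a a_a_a a_a_a_alt
  induction PySem.Chars.splitOn input_text.toList " ".toList using List.reverseRecOn with
  | nil => rfl
  | append_singleton l word ih =>
    simp only [List.foldl_append, List.foldl_cons, List.foldl_nil, List.map_append,
      List.map_cons, List.map_nil, List.sum_append, List.sum_cons, List.sum_nil]
    rw [ih, pvStep, pvReNone]
    push_cast
    ring
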